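-- pv_equiv track=rewrite | github.com/Ayma-n/dl-fp | offline_preprocess.py | check_naturey
-- ===== SOURCE A (Python) =====
-- buzzwords = ["cow", "sheep", "mountain", "hill", "countryside", "grass", "forest", "nature",
--                  "farm", "alpaca", "horse", "landscape", "fence"]
--
-- def check_naturey(captions: list[str]):
--     #returns true if a caption for this image has one of our buzz words, false otherwise
--     def match(word):
--         for capt in captions:
--             if word in capt.lower():
--                 return True
--         return False
--     truth_map = [match(word) for word in buzzwords]
--     return any(truth_map)
-- ===== SOURCE B (Python) =====
-- import re
--
-- buzzwords = ["cow", "sheep", "mountain", "hill", "countryside", "grass", "forest", "nature",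
--                  "farm", "alpaca", "horse", "landscape", "fence"]
--
-- _pattern = re.compile("|".join(re.escape(w) for w in buzzwords))
--
-- def check_naturey(captions: list[str]):
--     return any(_pattern.search(capt.lower()) for capt in captions)
-- ===== Notes on version B (the rewrite author's own statement) =====
-- stated objective: faster
-- what changed: Replaces the per-buzzword nested scan (which lowercases every caption once per word) and the materialised truth_map with one compiled regex alternation, iterating the captions once and lowercasing each caption exactly once.
import Mathlib
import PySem

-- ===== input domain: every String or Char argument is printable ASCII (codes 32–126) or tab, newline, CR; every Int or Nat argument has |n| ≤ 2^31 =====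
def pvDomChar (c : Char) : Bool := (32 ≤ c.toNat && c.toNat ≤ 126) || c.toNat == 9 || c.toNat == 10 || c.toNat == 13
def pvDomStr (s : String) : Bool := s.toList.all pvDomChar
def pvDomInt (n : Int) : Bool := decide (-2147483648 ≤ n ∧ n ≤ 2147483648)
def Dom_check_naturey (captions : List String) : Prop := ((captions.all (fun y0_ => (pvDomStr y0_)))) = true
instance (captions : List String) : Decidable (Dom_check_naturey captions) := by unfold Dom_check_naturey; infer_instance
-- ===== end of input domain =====

-- B replaces the per-buzzword nested scans and truth_map with one pass over the captions,
-- matching a compiled regex alternation of the (literal, escape-free) buzzwords against each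
-- lowercased caption; both programs are total, so no Pre_.

-- ===== PORT A =====
def pvBuzzwords : List String :=
  ["cow", "sheep", "mountain", "hill", "countryside", "grass", "forest", "nature",
   "farm", "alpaca", "horse", "landscape", "fence"]

-- inner 'def match(word)': scan captions, return True on first hit
def pvMatch (captions : List String) (word : String) : Bool :=
  captions.any (fun capt => PySem.Str.isIn word (PySem.Str.lower capt))

def check_naturey (captions : List String) : Bool :=
  let truth_map := pvBuzzwords.map (pvMatch captions)
  truth_map.any id

-- ===== PORT B =====
-- _pattern.search(lc): the regex is an alternation of escape-free literal words, so it
-- matches lc iff some buzzword is a substring of lc (exact for these literals).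
def pvSearch (lc : String) : Bool :=
  pvBuzzwords.any (fun w => PySem.Str.isIn w lc)

def check_naturey_alt (captions : List String) : Bool :=
  captions.any (fun capt => pvSearch (PySem.Str.lower capt))

-- ===== PRECONDITION & SPEC =====
def Spec_check_naturey (captions : List String) (out : Bool) : Prop := out = check_naturey_alt captions
instance (captions : List String) (out : Bool) : Decidable (Spec_check_naturey captions out) := by unfold Spec_check_naturey; infer_instance

-- ===== CLAIM (what is proved, stated in full; the proofs are below) =====
def Claim_equal_check_naturey : Prop := ∀ (captions : List String), Dom_check_naturey captions → Spec_check_naturey captions (check_naturey captions)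

-- ===== LEMMAS AND PROOFS =====

-- ===== VERDICT (by name: the statement is the Claim_ definition above) =====
theorem check_naturey_spec : Claim_equal_check_naturey := by
  intro captions _
  unfold Spec_check_naturey check_naturey check_naturey_alt pvMatch pvSearch
  rw [Bool.eq_iff_iff]
  simp only [List.any_map, List.any_eq_true, Function.comp, id]
  tauto
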